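-- pv_equiv track=rewrite | github.com/DreamWalker1412/DataMining | AprioriReduce.py | findCandidate1
-- ===== SOURCE A (Python) =====
-- def findCandidate1(dataSet):
--     candidate1 = []
--     for line in dataSet:
--         for item in line:
--             if not [item] in candidate1:
--                 candidate1.append([item])
--     candidate1.sort()
--     return list(map(frozenset, candidate1))  # 返回list，每个元素为frozenset
-- ===== SOURCE B (Python) =====
-- def findCandidate1(dataSet):
--     items = sorted(x for line in dataSet for x in line)
--     res = []
--     prev = None
--     for x in items:
--         if prev is None or x != prev:
--             res.append(frozenset([x]))
--         prev = x
--     return res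
-- ===== Notes on version B (the rewrite author's own statement) =====
-- stated objective: faster
-- what changed: A keeps a list of singleton lists and scans it for membership on every item before sorting; B flattens, sorts once, and emits a singleton frozenset on each change of adjacent value (comparison-based dedup, no hashing).
import Mathlib
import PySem

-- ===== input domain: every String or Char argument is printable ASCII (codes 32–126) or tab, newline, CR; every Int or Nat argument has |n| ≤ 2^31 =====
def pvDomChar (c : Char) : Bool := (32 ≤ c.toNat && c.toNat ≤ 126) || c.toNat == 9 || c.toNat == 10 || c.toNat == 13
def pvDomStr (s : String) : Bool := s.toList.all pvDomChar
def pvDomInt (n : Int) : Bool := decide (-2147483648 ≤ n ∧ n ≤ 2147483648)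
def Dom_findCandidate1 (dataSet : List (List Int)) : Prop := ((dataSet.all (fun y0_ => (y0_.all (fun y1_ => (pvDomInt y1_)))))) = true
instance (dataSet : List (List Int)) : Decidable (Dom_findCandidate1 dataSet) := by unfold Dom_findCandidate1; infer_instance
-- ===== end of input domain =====

-- B replaces A's per-item scan of the accumulated candidate list by flatten + sort + adjacent dedup (faster in a timing run).

-- ===== PORT A =====
def findCandidate1 (dataSet : List (List Int)) : List (List Int) :=
  let candidate1 :=
    dataSet.foldl (fun cand line =>
      line.foldl (fun c item => if [item] ∈ c then c else c ++ [[item]]) cand) []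
  (PySem.List.sorted candidate1 (fun l => l)).map (fun l => PySem.Set.ofList l)

-- ===== PORT B =====
def findCandidate1_alt (dataSet : List (List Int)) : List (List Int) :=
  let items := PySem.List.sorted (dataSet.flatMap (fun line => line)) (fun x => x)
  (items.foldl (fun (st : List (List Int) × Option Int) x =>
      (match st.2 with
       | none => st.1 ++ [PySem.Set.ofList [x]]
       | some p => if x ≠ p then st.1 ++ [PySem.Set.ofList [x]] else st.1,
       some x))
    ([], none)).1

-- ===== PRECONDITION & SPEC =====
def Spec_findCandidate1 (dataSet : List (List Int)) (out : List (List Int)) : Prop := out = findCandidate1_alt dataSet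
instance (dataSet : List (List Int)) (out : List (List Int)) : Decidable (Spec_findCandidate1 dataSet out) := by unfold Spec_findCandidate1; infer_instance

-- ===== CLAIM (what is proved, stated in full; the proofs are below) =====
def Claim_equal_findCandidate1 : Prop := ∀ (dataSet : List (List Int)), Dom_findCandidate1 dataSet → Spec_findCandidate1 dataSet (findCandidate1 dataSet)

-- ===== LEMMAS AND PROOFS =====

-- adjacent-dedup recursion underlying B's loop
def pvGo : Option Int → List Int → List Int
  | _, [] => []
  | none, x :: xs => x :: pvGo (some x) xs
  | some p, x :: xs => if x = p then pvGo (some p) xs else x :: pvGo (some x) xs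

lemma pvGo_some_spec (l : List Int) (h : l.Pairwise (· ≤ ·)) :
    ∀ p : Int, (∀ x ∈ l, p ≤ x) →
      (∀ y, y ∈ pvGo (some p) l ↔ y ∈ l ∧ y ≠ p) ∧
      (pvGo (some p) l).Pairwise (· < ·) ∧ (∀ y ∈ pvGo (some p) l, p < y) := by
  induction l with
  | nil => simp [pvGo]
  | cons x xs ih =>
    intro p hp
    have hx : ∀ y ∈ xs, x ≤ y := (List.pairwise_cons.mp h).1
    have hxs := (List.pairwise_cons.mp h).2
    by_cases hxp : x = p
    · subst hxp
      obtain ⟨hm, hpw, hgt⟩ := ih hxs x hx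
      refine ⟨?_, by simpa [pvGo] using hpw, by simpa [pvGo] using hgt⟩
      intro y
      have hred : pvGo (some x) (x :: xs) = pvGo (some x) xs := by simp [pvGo]
      rw [hred, hm, List.mem_cons]
      constructor
      · rintro ⟨hy, hne⟩; exact ⟨Or.inr hy, hne⟩
      · rintro ⟨hy | hy, hne⟩
        · exact absurd hy hne
        · exact ⟨hy, hne⟩
    · have hpx : p < x := lt_of_le_of_ne (hp x (List.mem_cons_self)) (Ne.symm hxp)
      obtain ⟨hm, hpw, hgt⟩ := ih hxs x hx
      have hgo : pvGo (some p) (x :: xs) = x :: pvGo (some x) xs := by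
        simp [pvGo, hxp]
      refine ⟨?_, ?_, ?_⟩
      · intro y
        rw [hgo]
        simp only [List.mem_cons, hm]
        constructor
        · rintro (rfl | ⟨hy, _⟩)
          · exact ⟨Or.inl rfl, hxp⟩
          · exact ⟨Or.inr hy, ne_of_gt (lt_of_lt_of_le hpx (hx y hy))⟩
        · rintro ⟨rfl | hy, hne⟩
          · exact Or.inl rfl
          · by_cases hyx : y = x
            · exact Or.inl hyx
            · exact Or.inr ⟨hy, hyx⟩
      · rw [hgo]
        exact List.pairwise_cons.mpr ⟨fun y hy => hgt y hy, hpw⟩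
      · rw [hgo]
        intro y hy
        rcases List.mem_cons.mp hy with rfl | hy
        · exact hpx
        · exact lt_trans hpx (hgt y hy)

lemma pvGo_none_mem (l : List Int) (h : l.Pairwise (· ≤ ·)) :
    ∀ y, y ∈ pvGo none l ↔ y ∈ l := by
  cases l with
  | nil => simp [pvGo]
  | cons x xs =>
    have hx : ∀ y ∈ xs, x ≤ y := (List.pairwise_cons.mp h).1
    have hxs := (List.pairwise_cons.mp h).2
    obtain ⟨hm, _, _⟩ := pvGo_some_spec xs hxs x hx
    intro y
    simp only [pvGo, List.mem_cons, hm]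
    constructor
    · rintro (rfl | ⟨hy, _⟩)
      · exact Or.inl rfl
      · exact Or.inr hy
    · rintro (rfl | hy)
      · exact Or.inl rfl
      · by_cases hyx : y = x
        · exact Or.inl hyx
        · exact Or.inr ⟨hy, hyx⟩

lemma pvGo_none_pairwise (l : List Int) (h : l.Pairwise (· ≤ ·)) :
    (pvGo none l).Pairwise (· < ·) := by
  cases l with
  | nil => simp [pvGo]
  | cons x xs =>
    have hx : ∀ y ∈ xs, x ≤ y := (List.pairwise_cons.mp h).1
    have hxs := (List.pairwise_cons.mp h).2
    obtain ⟨_, hpw, hgt⟩ := pvGo_some_spec xs hxs x hx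
    exact List.pairwise_cons.mpr ⟨hgt, hpw⟩

-- B's foldl computes pvGo
lemma pvFoldl_go (l : List Int) : ∀ (acc : List (List Int)) (p? : Option Int),
    (l.foldl (fun (st : List (List Int) × Option Int) x =>
      (match st.2 with
       | none => st.1 ++ [PySem.Set.ofList [x]]
       | some p => if x ≠ p then st.1 ++ [PySem.Set.ofList [x]] else st.1,
       some x)) (acc, p?)).1 = acc ++ (pvGo p? l).map (fun x => [x]) := by
  induction l with
  | nil => intro acc p?; simp [pvGo]
  | cons x xs ih =>
    intro acc p?
    cases p? with
    | none =>
      simp only [List.foldl_cons, ih]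
      simp [pvGo, PySem.Set.ofList, PySem.Set.add, PySem.Set.empty]
    | some p =>
      by_cases hxp : x = p
      · subst hxp
        simp only [List.foldl_cons, ih]
        simp [pvGo]
      · simp only [List.foldl_cons, ih]
        simp [pvGo, hxp, PySem.Set.ofList, PySem.Set.add, PySem.Set.empty]

-- A's inner accumulation over singletons mirrors PySem.Set.add over items
lemma pvA_loop (l : List Int) : ∀ (seen : List Int),
    l.foldl (fun c item => if [item] ∈ c then c else c ++ [[item]])
        (seen.map (fun x => [x]))
      = (l.foldl PySem.Set.add seen).map (fun x => [x]) := by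
  induction l with
  | nil => intro seen; rfl
  | cons x xs ih =>
    intro seen
    have hmem : ([x] ∈ seen.map (fun y => ([y] : List Int))) ↔ x ∈ seen := by
      simp
    by_cases hx : x ∈ seen
    · have hc : PySem.Set.add seen x = seen := by
        simp [PySem.Set.add, hx]
      simp only [List.foldl_cons, if_pos (hmem.mpr hx), hc, ih]
    · have hc : PySem.Set.add seen x = seen ++ [x] := by
        simp only [PySem.Set.add]
        rw [if_neg (by simpa using hx)]
      have : seen.map (fun y => ([y] : List Int)) ++ [[x]]
          = (seen ++ [x]).map (fun y => ([y] : List Int)) := by simp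
      simp only [List.foldl_cons, if_neg (fun h => hx (hmem.mp h)), hc, this, ih]

theorem pv_main (dataSet : List (List Int)) :
    findCandidate1 dataSet = findCandidate1_alt dataSet := by
  unfold findCandidate1 findCandidate1_alt
  set items := dataSet.flatten with hitems
  have hflat : dataSet.flatMap (fun line => line) = items := by
    simp [hitems]
  -- A's nested loop builds the ordered dedup of items, as singleton lists
  have hA : dataSet.foldl (fun cand line =>
        line.foldl (fun c item => if [item] ∈ c then c else c ++ [[item]]) cand) []
      = (PySem.Set.ofList items).map (fun x => [x]) := by
    have h1 : dataSet.foldl (fun cand line =>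
          line.foldl (fun c item => if [item] ∈ c then c else c ++ [[item]]) cand) []
        = items.foldl (fun c item => if [item] ∈ c then c else c ++ [[item]]) [] := by
      rw [hitems, List.foldl_flatten]
    rw [h1]
    have := pvA_loop items []
    simpa [PySem.Set.ofList, PySem.Set.empty] using this
  rw [hflat, hA]
  set s := PySem.List.sorted items (fun x => x) with hs
  have hsort : s.Pairwise (· ≤ ·) := by
    simpa using PySem.List.sorted_pairwise items (fun x => x)
  rw [pvFoldl_go s [] none]
  simp only [List.nil_append]
  -- the sorted dedup of the singleton candidates, named explicitly
  have hperm : ((pvGo none s).map (fun x => ([x] : List Int))).Perm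
      ((PySem.Set.ofList items).map (fun x => [x])) := by
    apply List.Perm.map
    apply List.perm_of_nodup_nodup_toFinset_eq
    · exact (pvGo_none_pairwise s hsort).imp (fun h => ne_of_lt h)
    · exact PySem.Set.nodup_ofList items
    · ext y
      simp only [List.mem_toFinset]
      rw [pvGo_none_mem s hsort, PySem.Set.mem_ofList]
      exact (PySem.List.mem_sorted items (fun x => x) false y)
  have hpw : ((pvGo none s).map (fun x => ([x] : List Int))).Pairwise
      (fun a b => a < b) := by
    rw [List.pairwise_map]
    exact (pvGo_none_pairwise s hsort).imp (fun h => List.Lex.rel h)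
  have hsorted := PySem.List.sorted_eq_of_perm_of_pairwise_lt
      ((PySem.Set.ofList items).map (fun x => ([x] : List Int)))
      ((pvGo none s).map (fun x => ([x] : List Int))) (fun l => l) hperm hpw
  -- map frozenset over singletons is the identity
  have hmapid : ((pvGo none s).map (fun x => ([x] : List Int))).map
      (fun l => PySem.Set.ofList l) = (pvGo none s).map (fun x => ([x] : List Int)) := by
    rw [List.map_map]
    apply List.map_congr_left
    intro x _
    rfl
  -- the port's sorted and the lemma's sorted differ only in the (subsingleton) Decidable instance
  have hinst : @PySem.List.sorted (List Int) (List Int) List.instLT (fun a b => a.decidableLT b)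
        ((PySem.Set.ofList items).map (fun x => ([x] : List Int))) (fun l => l) false
      = @PySem.List.sorted (List Int) (List Int) List.instLinearOrder.toLT LinearOrder.toDecidableLT
        ((PySem.Set.ofList items).map (fun x => ([x] : List Int))) (fun l => l) false := by
    congr 1
  exact (congrArg (List.map (fun l => PySem.Set.ofList l)) (hinst.trans hsorted)).trans hmapid

-- ===== VERDICT (by name: the statement is the Claim_ definition above) =====
theorem findCandidate1_spec : Claim_equal_findCandidate1 := by
  intro dataSet _
  unfold Spec_findCandidate1
  exact pv_main dataSet
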